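-- pv_equiv track=rewrite | github.com/HereComesTheMoon/Advent-of-Code-2023 | day21/main.py | diffs
-- ===== SOURCE A (Python) =====
-- def diffs(seq):
--     diff = [seq]
--     while True:
--         if not any(diff[-1]):
--             return diff
--         new = []
--         for k in range(len(diff[-1]) - 1):
--             new.append(diff[-1][k+1] - diff[-1][k])
--         diff.append(new)
-- ===== SOURCE B (Python) =====
-- def diffs(seq):
--     out = []
--     coeffs = [1]  # coeffs[j] == C(m, j), the m-th row of Pascal's triangle
--     m = 0
--     while True:
--         row = [sum((-1) ** (m - j) * coeffs[j] * seq[k + j] for j in range(m + 1))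
--                for k in range(len(seq) - m)]
--         out.append(row)
--         if not any(row):
--             return out
--         coeffs = [1] + [coeffs[j] + coeffs[j + 1] for j in range(m)] + [1]
--         m += 1
-- ===== Notes on version B (the rewrite author's own statement) =====
-- stated objective: alternative
-- what changed: B never derives a row from the previous row: it computes each m-th difference row directly from the original sequence by the closed form sum((-1)**(m-j)*C(m,j)*seq[k+j]), maintaining the binomial coefficient row with Pascal's rule, whereas A chains rows by subtracting adjacent entries of the last row.
import Mathlib
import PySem

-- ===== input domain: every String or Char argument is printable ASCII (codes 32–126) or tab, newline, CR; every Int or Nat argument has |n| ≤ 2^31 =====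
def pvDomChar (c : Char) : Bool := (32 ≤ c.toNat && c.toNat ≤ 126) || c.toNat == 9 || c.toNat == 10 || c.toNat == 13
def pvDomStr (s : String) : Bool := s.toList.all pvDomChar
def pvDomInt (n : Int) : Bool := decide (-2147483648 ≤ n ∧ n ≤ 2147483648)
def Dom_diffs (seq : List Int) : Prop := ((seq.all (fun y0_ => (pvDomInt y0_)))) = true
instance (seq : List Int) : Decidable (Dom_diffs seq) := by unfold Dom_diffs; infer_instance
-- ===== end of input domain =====

-- B is a different algorithm: it computes each m-th difference row directly from the original
-- sequence via signed binomial coefficients (Pascal's rule), instead of chaining rows as A does.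


-- ===== PORT A =====
-- the inner 'for k in range(len(diff[-1]) - 1): new.append(...)' loop over the last row cur
-- (indices k and k+1 are always in range, so getD is exact for Python's cur[k+1], cur[k])
def diffsNextA (cur : List Int) : List Int :=
  (List.range (cur.length - 1)).foldl (fun new k => new ++ [cur.getD (k + 1) 0 - cur.getD k 0]) []

theorem diffsNextA_length (cur : List Int) : (diffsNextA cur).length = cur.length - 1 := by
  unfold diffsNextA
  have h : ∀ (l : List Nat) (a : List Int),
      (l.foldl (fun new k => new ++ [cur.getD (k + 1) 0 - cur.getD k 0]) a).length
        = a.length + l.length := by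
    intro l
    induction l with
    | nil => intro a; simp
    | cons x xs ih =>
      intro a
      rw [List.foldl_cons, ih]
      simp
      omega
  simpa using h (List.range (cur.length - 1)) []

-- A's 'while True' loop; state: diff = acc ++ [cur], cur = the last row of diff
def diffsLoopA (acc : List (List Int)) (cur : List Int) : List (List Int) :=
  if cur.any (· != 0) then diffsLoopA (acc ++ [cur]) (diffsNextA cur)
  else acc ++ [cur]
termination_by cur.length
decreasing_by
  rename_i h
  have hne : cur ≠ [] := by rintro rfl; simp at h
  have h1 := diffsNextA_length cur
  have h2 : 0 < cur.length := List.length_pos_of_ne_nil hne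
  omega

def diffs (seq : List Int) : List (List Int) := diffsLoopA [] seq

-- ===== PORT B =====
-- row = [sum((-1)**(m-j)*coeffs[j]*seq[k+j] for j in range(m+1)) for k in range(len(seq)-m)]
-- (j ≤ m < len(coeffs) and k+j < len(seq), so getD is exact for Python's coeffs[j], seq[k+j])
def binRowB (m : Nat) (coeffs : List Int) (seq : List Int) : List Int :=
  (List.range (seq.length - m)).map (fun k =>
    ((List.range (m + 1)).map (fun j =>
      (-1 : Int) ^ (m - j) * coeffs.getD j 0 * seq.getD (k + j) 0)).sum)

-- coeffs = [1] + [coeffs[j] + coeffs[j+1] for j in range(m)] + [1]  (Pascal's rule)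
def pascalB (m : Nat) (coeffs : List Int) : List Int :=
  [1] ++ (List.range m).map (fun j => coeffs.getD j 0 + coeffs.getD (j + 1) 0) ++ [1]

theorem binRowB_length (m : Nat) (coeffs seq : List Int) :
    (binRowB m coeffs seq).length = seq.length - m := by
  simp [binRowB]

-- B's 'while True' loop; state: out, coeffs (row m of Pascal's triangle), m
def diffsLoopB (seq : List Int) (out : List (List Int)) (coeffs : List Int) (m : Nat) :
    List (List Int) :=
  let row := binRowB m coeffs seq
  if row.any (· != 0) then diffsLoopB seq (out ++ [row]) (pascalB m coeffs) (m + 1)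
  else out ++ [row]
termination_by seq.length + 1 - m
decreasing_by
  rename_i h
  have h' : ((binRowB m coeffs seq).any (· != 0)) = true := h
  have hne : binRowB m coeffs seq ≠ [] := by
    rintro he; rw [he] at h'; simp at h'
  have h1 := binRowB_length m coeffs seq
  have h2 : 0 < (binRowB m coeffs seq).length := List.length_pos_of_ne_nil hne
  omega

def diffs_alt (seq : List Int) : List (List Int) := diffsLoopB seq [] [1] 0

-- ===== PRECONDITION & SPEC =====
def Spec_diffs (seq : List Int) (out : List (List Int)) : Prop := out = diffs_alt seq
instance (seq : List Int) (out : List (List Int)) : Decidable (Spec_diffs seq out) := by unfold Spec_diffs; infer_instance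

-- ===== CLAIM (what is proved, stated in full; the proofs are below) =====
def Claim_equal_diffs : Prop := ∀ (seq : List Int), Dom_diffs seq → Spec_diffs seq (diffs seq)

-- ===== LEMMAS AND PROOFS =====

-- row m of Pascal's triangle
def binomC (m : Nat) : List Int := (List.range (m + 1)).map (fun j => (m.choose j : Int))

theorem binomC_getD (m j : Nat) (h : j < m + 1) : (binomC m).getD j 0 = (m.choose j : Int) := by
  simp [binomC, List.getD_eq_getElem?_getD, h]

theorem binomC_getElem (m j : Nat) (h : j < (binomC m).length) :
    (binomC m)[j] = (m.choose j : Int) := by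
  simp [binomC]

theorem pascalB_binomC (m : Nat) : pascalB m (binomC m) = binomC (m + 1) := by
  unfold pascalB
  apply List.ext_getElem
  · simp [binomC]
  · intro i h1 h2
    have hi : i < m + 2 := by simp [binomC] at h2; omega
    rw [binomC_getElem (m+1) i h2, List.getElem_append]
    split_ifs with hL
    · rw [List.getElem_append]
      split_ifs with h0
      · have : i = 0 := by simp at h0; omega
        subst this; simp
      · have hI : 1 ≤ i := by simp at h0; omega
        have hIm : i - 1 < m := by simp at hL; omega
        simp only [List.length_cons, List.length_nil, List.getElem_map, List.getElem_range]
        rw [binomC_getD m (i-1) (by omega), binomC_getD m (i-1+1) (by omega)]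
        have : i = (i - 1) + 1 := by omega
        rw [this, Nat.choose_succ_succ]
        push_cast; ring
    · have : i = m + 1 := by simp at hL hi ⊢; omega
      subst this
      simp [Nat.choose_self]

-- list-sum ↔ Finset-sum bridge
theorem listsum_range (n : Nat) (f : Nat → Int) :
    ((List.range n).map f).sum = ∑ j ∈ Finset.range n, f j := rfl

theorem foldl_concat_map (f : Nat → Int) (l : List Nat) (a : List Int) :
    l.foldl (fun new k => new ++ [f k]) a = a ++ l.map f := by
  induction l generalizing a with
  | nil => simp
  | cons x xs ih => simp [ih]

-- the alternating-binomial Pascal step, unsigned form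
theorem binstep_core (s : Nat → Int) (m k : Nat) :
    (∑ j ∈ Finset.range (m + 2), (-1 : Int) ^ j * ((m + 1).choose j : Int) * s (k + j))
      = (∑ j ∈ Finset.range (m + 1), (-1 : Int) ^ j * (m.choose j : Int) * s (k + j))
        - ∑ j ∈ Finset.range (m + 1), (-1 : Int) ^ j * (m.choose j : Int) * s (k + j + 1) := by
  rw [Finset.sum_range_succ']
  have e1 : ∀ j ∈ Finset.range (m + 1),
      (-1 : Int) ^ (j+1) * ((m + 1).choose (j+1) : Int) * s (k + (j+1))
        = -((-1:Int) ^ j * (m.choose j : Int) * s (k + j + 1))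
          + (-1:Int) ^ (j+1) * (m.choose (j+1) : Int) * s (k + (j + 1)) := by
    intro j _
    rw [Nat.choose_succ_succ]
    push_cast
    simp only [← Nat.add_assoc]
    ring
  rw [Finset.sum_congr rfl e1, Finset.sum_add_distrib]
  have e2 : (∑ j ∈ Finset.range (m + 1), (-1:Int) ^ (j+1) * (m.choose (j+1) : Int) * s (k + (j + 1)))
      = (∑ j ∈ Finset.range (m + 2), (-1:Int) ^ j * (m.choose j : Int) * s (k + j)) - s k := by
    rw [Finset.sum_range_succ' (fun j => (-1:Int) ^ j * (m.choose j : Int) * s (k + j)) (m+1)]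
    simp
  rw [e2, Finset.sum_range_succ (fun j => (-1:Int) ^ j * (m.choose j : Int) * s (k + j)) (m+1)]
  simp [Finset.sum_neg_distrib]
  ring

theorem sign_split (m j : Nat) (h : j ≤ m) : (-1:Int)^(m-j) = (-1)^m * (-1)^j := by
  obtain ⟨d, rfl⟩ := Nat.exists_eq_add_of_le h
  rw [Nat.add_sub_cancel_left, pow_add, mul_comm ((-1:Int)^j), mul_assoc,
    ← pow_add, Even.neg_one_pow ⟨j, rfl⟩, mul_one]

-- signed form: the (m+1)-st difference is the difference of shifted m-th differences
theorem binstep (s : Nat → Int) (m k : Nat) :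
    (∑ j ∈ Finset.range (m + 2), (-1 : Int) ^ (m + 1 - j) * ((m + 1).choose j : Int) * s (k + j))
      = (∑ j ∈ Finset.range (m + 1), (-1 : Int) ^ (m - j) * (m.choose j : Int) * s (k + 1 + j))
        - ∑ j ∈ Finset.range (m + 1), (-1 : Int) ^ (m - j) * (m.choose j : Int) * s (k + j) := by
  have c1 : ∀ j ∈ Finset.range (m + 2),
      (-1 : Int) ^ (m + 1 - j) * ((m + 1).choose j : Int) * s (k + j)
        = (-1:Int)^(m+1) * ((-1:Int) ^ j * ((m + 1).choose j : Int) * s (k + j)) := by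
    intro j hj
    rw [sign_split (m+1) j (Nat.lt_succ_iff.mp (Finset.mem_range.mp hj))]
    ring
  have c2 : ∀ j ∈ Finset.range (m + 1),
      (-1 : Int) ^ (m - j) * (m.choose j : Int) * s (k + 1 + j)
        = (-1:Int)^m * ((-1:Int) ^ j * (m.choose j : Int) * s (k + j + 1)) := by
    intro j hj
    rw [sign_split m j (Nat.lt_succ_iff.mp (Finset.mem_range.mp hj)),
      show k + 1 + j = k + j + 1 from by omega]
    ring
  have c3 : ∀ j ∈ Finset.range (m + 1),
      (-1 : Int) ^ (m - j) * (m.choose j : Int) * s (k + j)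
        = (-1:Int)^m * ((-1:Int) ^ j * (m.choose j : Int) * s (k + j)) := by
    intro j hj
    rw [sign_split m j (Nat.lt_succ_iff.mp (Finset.mem_range.mp hj))]
    ring
  rw [Finset.sum_congr rfl c1, Finset.sum_congr rfl c2, Finset.sum_congr rfl c3,
    ← Finset.mul_sum, ← Finset.mul_sum, ← Finset.mul_sum, binstep_core, pow_succ]
  ring

-- A's inner loop as a map
theorem diffsNextA_map (cur : List Int) :
    diffsNextA cur = (List.range (cur.length - 1)).map (fun k => cur.getD (k + 1) 0 - cur.getD k 0) := by
  unfold diffsNextA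
  rw [foldl_concat_map]
  simp

-- A's successive rows
def rowIter (seq : List Int) : Nat → List Int
  | 0 => seq
  | m + 1 => diffsNextA (rowIter seq m)

theorem rowIter_length (seq : List Int) (m : Nat) : (rowIter seq m).length = seq.length - m := by
  induction m with
  | zero => simp [rowIter]
  | succ m ih => rw [rowIter, diffsNextA_length, ih]; omega

theorem binRowB_getD (m : Nat) (c seq : List Int) (k : Nat) (h : k < seq.length - m) :
    (binRowB m c seq).getD k 0
      = ∑ j ∈ Finset.range (m + 1), (-1 : Int) ^ (m - j) * c.getD j 0 * seq.getD (k + j) 0 := by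
  rw [← listsum_range]
  simp [binRowB, List.getD_eq_getElem?_getD, h]

theorem binRowB_zero (seq : List Int) : binRowB 0 (binomC 0) seq = seq := by
  unfold binRowB binomC
  apply List.ext_getElem
  · simp
  · intro i h1 h2
    simp [List.getD_eq_getElem?_getD, List.getElem?_eq_getElem h2]

theorem binRowB_step (seq : List Int) (m : Nat) :
    binRowB (m + 1) (binomC (m + 1)) seq = diffsNextA (binRowB m (binomC m) seq) := by
  rw [diffsNextA_map, binRowB_length]
  apply List.ext_getElem
  · simp [binRowB_length]; omega
  · intro i h1 h2
    have hi : i < seq.length - (m + 1) := by simpa [binRowB_length] using h1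
    simp only [List.getElem_map, List.getElem_range]
    rw [binRowB_getD m (binomC m) seq (i+1) (by omega), binRowB_getD m (binomC m) seq i (by omega)]
    unfold binRowB
    simp only [List.getElem_map, List.getElem_range]
    rw [listsum_range]
    have c0 : ∀ j ∈ Finset.range (m + 2),
        (-1 : Int) ^ (m + 1 - j) * (binomC (m+1)).getD j 0 * seq.getD (i + j) 0
          = (-1 : Int) ^ (m + 1 - j) * ((m + 1).choose j : Int) * seq.getD (i + j) 0 := by
      intro j hj
      rw [binomC_getD (m+1) j (Finset.mem_range.mp hj)]
    have c1 : ∀ j ∈ Finset.range (m + 1),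
        (-1 : Int) ^ (m - j) * (binomC m).getD j 0 * seq.getD (i + 1 + j) 0
          = (-1 : Int) ^ (m - j) * (m.choose j : Int) * seq.getD (i + 1 + j) 0 := by
      intro j hj
      rw [binomC_getD m j (Finset.mem_range.mp hj)]
    have c2 : ∀ j ∈ Finset.range (m + 1),
        (-1 : Int) ^ (m - j) * (binomC m).getD j 0 * seq.getD (i + j) 0
          = (-1 : Int) ^ (m - j) * (m.choose j : Int) * seq.getD (i + j) 0 := by
      intro j hj
      rw [binomC_getD m j (Finset.mem_range.mp hj)]
    rw [Finset.sum_congr rfl c0, Finset.sum_congr rfl c1, Finset.sum_congr rfl c2]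
    exact binstep (fun t => seq.getD t 0) m i

theorem binRowB_rowIter (seq : List Int) (m : Nat) : binRowB m (binomC m) seq = rowIter seq m := by
  induction m with
  | zero => rw [binRowB_zero]; rfl
  | succ m ih => rw [binRowB_step, ih]; rfl

theorem loopB_eq_loopA (seq : List Int) :
    ∀ fuel m out, seq.length + 1 - m ≤ fuel →
      diffsLoopB seq out (binomC m) m = diffsLoopA out (rowIter seq m) := by
  intro fuel
  induction fuel with
  | zero =>
    intro m out h
    have hr : rowIter seq m = [] := by
      have := rowIter_length seq m
      cases hrr : rowIter seq m with
      | nil => rfl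
      | cons a l => rw [hrr] at this; simp at this; omega
    have hb : binRowB m (binomC m) seq = [] := by
      rw [binRowB_rowIter, hr]
    rw [diffsLoopB, diffsLoopA]
    simp [hb, hr]
  | succ fuel ih =>
    intro m out h
    rw [diffsLoopB, diffsLoopA, binRowB_rowIter]
    by_cases hc : (rowIter seq m).any (· != 0)
    · simp only [hc, if_true]
      rw [pascalB_binomC, ih (m+1) (out ++ [rowIter seq m]) (by omega)]
      rfl
    · simp [hc]

-- ===== VERDICT (by name: the statement is the Claim_ definition above) =====
theorem diffs_spec : Claim_equal_diffs := by
  intro seq _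
  unfold Spec_diffs diffs diffs_alt
  have h : binomC 0 = [1] := by decide
  rw [← h, loopB_eq_loopA seq (seq.length + 1) 0 [] (by omega)]
  rfl
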